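-- pv_equiv track=rewrite | github.com/RunestoneInteractive/RunestoneComponents | runestone/utility/utility.py | spareBlobHelper
-- ===== SOURCE A (Python) =====
-- def spareBlobHelper(title, spareBlob):
--     if "<span" not in spareBlob:
--         return title
--
--     spareIdx0 = spareBlob.find("\"pre\">")
--     spareIdx1 = spareBlob.find("</span>")
--
--     spareSub = spareBlob[spareIdx0+6:spareIdx1]
--
--     title += spareSub
--     title += " "
--
--     spareBlob = spareBlob[spareIdx1+7:]
--
--     return spareBlobHelper(title, spareBlob)
-- ===== SOURCE B (Python) =====
-- def spareBlobHelper(title, spareBlob):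
--     parts = [title]
--     while "<span" in spareBlob:
--         i1 = spareBlob.find("</span>")
--         parts += [spareBlob[spareBlob.find('"pre">') + 6:i1], " "]
--         spareBlob = spareBlob[i1 + 7:]
--     return "".join(parts)
-- ===== Notes on version B (the rewrite author's own statement) =====
-- stated objective: idiomatic
-- what changed: Replaces the tail recursion that rebuilds the growing title string on every call with a while loop that collects the extracted pieces in a list and joins them once at the end.
import Mathlib
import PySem

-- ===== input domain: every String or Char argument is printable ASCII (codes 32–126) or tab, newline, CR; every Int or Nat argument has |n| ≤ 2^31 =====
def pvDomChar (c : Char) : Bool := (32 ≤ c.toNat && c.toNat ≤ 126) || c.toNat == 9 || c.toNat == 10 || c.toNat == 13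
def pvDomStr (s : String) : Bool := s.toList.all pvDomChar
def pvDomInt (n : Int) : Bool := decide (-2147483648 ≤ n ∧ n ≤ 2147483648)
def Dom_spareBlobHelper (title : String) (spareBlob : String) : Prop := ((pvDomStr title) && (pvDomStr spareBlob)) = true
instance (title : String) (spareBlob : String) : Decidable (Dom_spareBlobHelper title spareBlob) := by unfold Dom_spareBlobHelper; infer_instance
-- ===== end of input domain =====

-- B replaces A's tail recursion (which rebuilds the growing title on every call) by a while
-- loop collecting the extracted pieces in a list, joined once at the end.

-- termination helper for both ports: cutting the blob at find("</span>")+7 strictly shrinks it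
theorem pv_cut_lt (blob : List Char) (hne : blob ≠ [])
    (i1 : Int) (h1 : -1 ≤ i1) :
    (PySem.List.slice blob (some (i1 + 7)) none).length < blob.length := by
  rw [PySem.List.slice_some_none]
  have hc := PySem.List.clampIdx_le blob.length (i1 + 7)
  have hlen : 0 < blob.length := List.length_pos_iff.mpr hne
  have hpos : 0 < PySem.List.clampIdx blob.length (i1 + 7) := by
    unfold PySem.List.clampIdx
    split_ifs <;> omega
  simp only [List.length_drop]
  omega

-- ===== PORT A =====
-- literal transliteration of A's tail recursion, on the character lists
def spareBlobHelperGoA (title : List Char) (blob : List Char) : List Char :=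
  if PySem.Chars.isIn "<span".toList blob = false then title
  else
    let spareIdx0 := PySem.Chars.find blob "\"pre\">".toList
    let spareIdx1 := PySem.Chars.find blob "</span>".toList
    let spareSub := PySem.List.slice blob (some (spareIdx0 + 6)) (some spareIdx1)
    spareBlobHelperGoA (title ++ spareSub ++ [' ']) (PySem.List.slice blob (some (spareIdx1 + 7)) none)
termination_by blob.length
decreasing_by
  exact pv_cut_lt blob
    (by rename_i h; intro hnil; subst hnil; exact h (by decide))
    _ (PySem.Chars.neg_one_le_find blob _)

def spareBlobHelper (title : String) (spareBlob : String) : String :=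
  String.ofList (spareBlobHelperGoA title.toList spareBlob.toList)

-- ===== PORT B =====
-- termination of Source B's while loop, at the String level
theorem pvStrCut (s : String) (h : PySem.Str.isIn "<span" s = true) :
    (PySem.Str.slice s (some (PySem.Str.find s "</span>" + 7)) none).toList.length < s.toList.length := by
  simp only [PySem.Str.toList_slice, PySem.Str.find_eq, PySem.Chars.slice_eq_listSlice]
  refine pv_cut_lt _ (fun hnil => ?_) _ (PySem.Chars.neg_one_le_find _ _)
  rw [PySem.Str.isIn_eq, hnil] at h
  exact absurd h (by decide)

-- Source B's while loop as a tail-recursive accumulator over the parts list (String level)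
def spareBlobHelperLoop (parts : List String) (spareBlob : String) : List String :=
  if PySem.Str.isIn "<span" spareBlob then
    let i1 := PySem.Str.find spareBlob "</span>"
    spareBlobHelperLoop
      (parts ++ [PySem.Str.slice spareBlob (some (PySem.Str.find spareBlob "\"pre\">" + 6)) (some i1), " "])
      (PySem.Str.slice spareBlob (some (i1 + 7)) none)
  else parts
termination_by spareBlob.toList.length
decreasing_by exact pvStrCut spareBlob ‹_›

def spareBlobHelper_alt (title : String) (spareBlob : String) : String :=
  PySem.Str.join "" (spareBlobHelperLoop [title] spareBlob)

-- ===== PRECONDITION & SPEC =====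
def Spec_spareBlobHelper (title : String) (spareBlob : String) (out : String) : Prop := out = spareBlobHelper_alt title spareBlob
instance (title : String) (spareBlob : String) (out : String) : Decidable (Spec_spareBlobHelper title spareBlob out) := by unfold Spec_spareBlobHelper; infer_instance

-- ===== CLAIM (what is proved, stated in full; the proofs are below) =====
def Claim_equal_spareBlobHelper : Prop := ∀ (title : String) (spareBlob : String), Dom_spareBlobHelper title spareBlob → Spec_spareBlobHelper title spareBlob (spareBlobHelper title spareBlob)

-- ===== LEMMAS AND PROOFS =====
theorem join_nil_eq_flatten (l : List (List Char)) : PySem.Chars.join [] l = l.flatten := by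
  induction l with
  | nil => simp [PySem.Chars.join_nil]
  | cons a t ih =>
    cases t with
    | nil => simp [PySem.Chars.join_singleton]
    | cons b u => rw [PySem.Chars.join_cons_cons, ih]; simp

-- the loop invariant: joining the final parts list = A's recursion started at the join of the current parts
theorem loop_invariant (n : Nat) : ∀ (blob : String), blob.toList.length ≤ n → ∀ (parts : List String),
    (PySem.Str.join "" (spareBlobHelperLoop parts blob)).toList
      = spareBlobHelperGoA (PySem.Str.join "" parts).toList blob.toList := by
  induction n with
  | zero =>
    intro blob hb parts
    have hnil : blob.toList = [] := List.eq_nil_of_length_eq_zero (by omega)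
    rw [spareBlobHelperLoop, spareBlobHelperGoA, hnil]
    rw [if_neg (by rw [PySem.Str.isIn_eq, hnil]; decide), if_pos (by decide)]
  | succ n ih =>
    intro blob hb parts
    rw [spareBlobHelperLoop, spareBlobHelperGoA]
    by_cases h : PySem.Str.isIn "<span" blob = true
    · have hC : PySem.Chars.isIn "<span".toList blob.toList = true := by
        rw [← PySem.Str.isIn_eq]; exact h
      rw [if_pos h, if_neg (by rw [hC]; decide)]
      have hne : blob.toList ≠ [] := by
        intro hnil; rw [hnil] at hC; exact absurd hC (by decide)
      have hcut := pv_cut_lt blob.toList hne (PySem.Chars.find blob.toList "</span>".toList)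
        (PySem.Chars.neg_one_le_find blob.toList _)
      have ih' := ih (PySem.Str.slice blob
        (some (PySem.Str.find blob "</span>" + 7)) none)
        (by simp only [PySem.Str.toList_slice, PySem.Str.find_eq,
              PySem.Chars.slice_eq_listSlice]; omega)
        (parts ++ [PySem.Str.slice blob (some (PySem.Str.find blob "\"pre\">" + 6))
          (some (PySem.Str.find blob "</span>")), " "])
      rw [ih']
      simp only [PySem.Str.toList_slice, PySem.Str.find_eq, PySem.Str.toList_join]
      simp [join_nil_eq_flatten]
    · have hC : PySem.Chars.isIn "<span".toList blob.toList = false := by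
        rw [← PySem.Str.isIn_eq]; simpa using h
      rw [if_neg h, if_pos (by rw [hC])]
-- ===== VERDICT (by name: the statement is the Claim_ definition above) =====
theorem spareBlobHelper_spec : Claim_equal_spareBlobHelper := by
  intro title spareBlob _
  unfold Spec_spareBlobHelper spareBlobHelper spareBlobHelper_alt
  have h := loop_invariant spareBlob.toList.length spareBlob le_rfl [title]
  have ht : (PySem.Str.join "" [title]).toList = title.toList := by
    simp [PySem.Str.toList_join]
  rw [ht] at h
  rw [← h]
  exact String.ofList_toList
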